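-- pv_equiv track=rewrite | github.com/Ayush-Jasani/AP-Final-Assignment | 14.py | problem14_groupWords
-- ===== SOURCE A (Python) =====
-- def problem14_groupWords(words):
--     groups = []
--     used = []
--
--     i = 0
--     while i < list_len(words):
--         if in_list(used, i):
--             i += 1
--             continue
--         temp_group = [words[i]]
--         used.append(i)
--
--         j = i + 1
--         while j < list_len(words):
--             if share_char(words[i], words[j]):
--                 temp_group.append(words[j])
--                 used.append(j)
--             j += 1
--
--         groups.append(temp_group)
--         i += 1
--     return groups
--
-- def list_len(lst):
--     cnt = 0
--     for _ in lst:
--         cnt += 1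
--     return cnt
--
-- def in_list(lst, val):
--     for item in lst:
--         if item == val:
--             return True
--     return False
--
-- def share_char(w1, w2):
--     for ch1 in w1:
--         for ch2 in w2:
--             if ch1 == ch2:
--                 return True
--     return False
-- ===== SOURCE B (Python) =====
-- def problem14_groupWords(words):
--     # Inverted index: char -> list of word indices containing it (ascending).
--     index = {}
--     for idx, w in enumerate(words):
--         for ch in set(w):
--             index.setdefault(ch, []).append(idx)
--     groups = []
--     used = set()
--     for i, w in enumerate(words):
--         if i in used:
--             continue
--         cand = set()
--         for ch in set(w):
--             cand.update(index[ch])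
--         members = sorted(j for j in cand if j > i)
--         groups.append([w] + [words[j] for j in members])
--         used.add(i)
--         used.update(members)
--     return groups
-- ===== Notes on version B (the rewrite author's own statement) =====
-- stated objective: faster
-- what changed: Replaces A's nested pairwise scan (for each unused seed, re-scan all later words comparing every char pair) with an inverted char-to-indices index built in one pass; each group's members come from unioning the seed's index lists and sorting, and 'used' is a hash set instead of a linearly scanned list.
import Mathlib
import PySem

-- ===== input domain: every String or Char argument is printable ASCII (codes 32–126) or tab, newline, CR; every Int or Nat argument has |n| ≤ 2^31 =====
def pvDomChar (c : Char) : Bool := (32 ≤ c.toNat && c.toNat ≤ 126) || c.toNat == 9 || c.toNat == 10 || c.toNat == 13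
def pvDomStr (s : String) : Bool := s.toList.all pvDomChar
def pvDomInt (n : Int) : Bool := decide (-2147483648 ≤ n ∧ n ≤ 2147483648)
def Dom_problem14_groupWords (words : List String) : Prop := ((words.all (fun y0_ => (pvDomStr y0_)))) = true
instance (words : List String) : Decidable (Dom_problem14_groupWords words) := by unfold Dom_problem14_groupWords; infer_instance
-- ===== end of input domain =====

-- B replaces A's quadratic pairwise scan by an inverted char→indices index built in one pass;
-- candidates for each seed group come from index lookups (objective: faster).


-- ===== PORT A =====
-- helper list_len: counting loop
def pyListLen {α : Type} (lst : List α) : Int := lst.foldl (fun cnt _ => cnt + 1) 0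

-- helper in_list: linear scan with early return
def pyInList (lst : List Int) (v : Int) : Bool := lst.any (fun item => item == v)

-- helper share_char: nested char loops with early return
def pyShareChar (w1 w2 : String) : Bool :=
  w1.toList.any (fun ch1 => w2.toList.any (fun ch2 => ch1 == ch2))

-- words[j] (always called with 0 ≤ j < len(words))
def aWordAt (words : List String) (j : Int) : String := PySem.List.pyGetD words j ""

-- A's inner while loop over j, state (temp_group, used)
def aInner (words : List String) (wi : String) (tg : List String) (used : List Int) (j : Int) :
    List String × List Int :=
  if _h : j < pyListLen words then
    if pyShareChar wi (aWordAt words j) then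
      aInner words wi (tg ++ [aWordAt words j]) (used ++ [j]) (j + 1)
    else
      aInner words wi tg used (j + 1)
  else (tg, used)
termination_by (pyListLen words - j).toNat
decreasing_by all_goals omega

-- A's outer while loop over i, state (groups, used)
def aMain (words : List String) (groups : List (List String)) (used : List Int) (i : Int) :
    List (List String) :=
  if _h : i < pyListLen words then
    if pyInList used i then
      aMain words groups used (i + 1)
    else
      let r := aInner words (aWordAt words i) [aWordAt words i] (used ++ [i]) (i + 1)
      aMain words (groups ++ [r.1]) r.2 (i + 1)
  else groups
termination_by (pyListLen words - i).toNat
decreasing_by all_goals omega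

def problem14_groupWords (words : List String) : List (List String) := aMain words [] [] 0

-- ===== PORT B =====
-- enumerate(words) starting at k
def bEnum (k : Int) : List String → List (Int × String)
  | [] => []
  | w :: ws => (k, w) :: bEnum (k + 1) ws

-- for ch in set(w): index.setdefault(ch, []).append(idx)
def bAddWord (d : PySem.Dict Char (List Int)) (idx : Int) (w : String) :
    PySem.Dict Char (List Int) :=
  (PySem.Set.ofList w.toList).foldl (fun d ch => d.modify ch [] (fun l => l ++ [idx])) d

-- the inverted index: char ↦ ascending list of indices of words containing it
def bIndex (words : List String) : PySem.Dict Char (List Int) :=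
  (bEnum 0 words).foldl (fun d p => bAddWord d p.1 p.2) PySem.Dict.empty

-- cand = set(); for ch in set(w): cand.update(index[ch])
def bCand (index : PySem.Dict Char (List Int)) (w : String) : PySem.Set Int :=
  (PySem.Set.ofList w.toList).foldl (fun s ch => PySem.Set.update s (index.getD ch [])) PySem.Set.empty

-- B's single pass over enumerate(words), state (groups, used-set)
def bGo (words : List String) (index : PySem.Dict Char (List Int)) :
    List (Int × String) → List (List String) → PySem.Set Int → List (List String)
  | [], groups, _ => groups
  | (i, w) :: rest, groups, used =>
      if PySem.Set.contains used i then bGo words index rest groups used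
      else
        let members :=
          PySem.List.sorted ((bCand index w).filter (fun j => decide (i < j))) (fun x => x)
        bGo words index rest
          (groups ++ [w :: members.map (fun j => PySem.List.pyGetD words j "")])
          (PySem.Set.update (PySem.Set.add used i) members)

def problem14_groupWords_alt (words : List String) : List (List String) :=
  bGo words (bIndex words) (bEnum 0 words) [] []

-- ===== PRECONDITION & SPEC =====
def Spec_problem14_groupWords (words : List String) (out : List (List String)) : Prop := out = problem14_groupWords_alt words
instance (words : List String) (out : List (List String)) : Decidable (Spec_problem14_groupWords words out) := by unfold Spec_problem14_groupWords; infer_instance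

-- ===== CLAIM (what is proved, stated in full; the proofs are below) =====
def Claim_equal_problem14_groupWords : Prop := ∀ (words : List String), Dom_problem14_groupWords words → Spec_problem14_groupWords words (problem14_groupWords words)

-- ===== LEMMAS AND PROOFS =====

theorem pyListLen_eq {α : Type} (lst : List α) : pyListLen lst = (lst.length : Int) := by
  simp [pyListLen, PySem.List.foldl_add (g := fun _ => (1:Int))]

theorem mem_bEnum (ws : List String) (k j : Int) (w : String) :
    (j, w) ∈ bEnum k ws ↔ k ≤ j ∧ j < k + ws.length ∧ aWordAt ws (j - k) = w := by
  induction ws generalizing k with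
  | nil => simp [bEnum]; omega
  | cons w0 ws ih =>
    simp only [bEnum, List.mem_cons, ih, Prod.mk.injEq]
    constructor
    · rintro (⟨rfl, rfl⟩ | ⟨h1, h2, h3⟩)
      · refine ⟨le_refl _, by simp only [List.length_cons]; push_cast; omega, ?_⟩
        simp [aWordAt, PySem.List.pyGetD_of_nonneg (i := (0:Int))]
      · refine ⟨by omega, by simp only [List.length_cons]; push_cast; omega, ?_⟩
        rw [aWordAt, PySem.List.pyGetD_of_nonneg _ _ (by omega)] at h3 ⊢
        have : (j - k).toNat = (j - (k+1)).toNat + 1 := by omega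
        simpa [this] using h3
    · rintro ⟨h1, h2, h3⟩
      rcases eq_or_lt_of_le h1 with rfl | hlt
      · left
        rw [aWordAt, PySem.List.pyGetD_of_nonneg _ _ (by omega)] at h3
        simpa using h3.symm
      · right
        refine ⟨by omega, by simp only [List.length_cons] at h2; push_cast at h2 ⊢; omega, ?_⟩
        rw [aWordAt, PySem.List.pyGetD_of_nonneg _ _ (by omega)] at h3 ⊢
        have : (j - k).toNat = (j - (k+1)).toNat + 1 := by omega
        simpa [this] using h3

theorem bAddWord_getD (d : PySem.Dict Char (List Int)) (idx : Int) (w : String) (ch : Char) :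
    (bAddWord d idx w).getD ch [] =
      d.getD ch [] ++ (if w.toList.contains ch then [idx] else []) := by
  have h1 : bAddWord d idx w =
      ((PySem.Set.ofList w.toList).map (fun c => (c, idx))).foldl
        (fun d p => d.modify p.1 [] (fun l => l ++ [p.2])) d := by
    simp only [List.foldl_map]
    rfl
  rw [h1, PySem.Dict.getD_foldl_modify_append]
  congr 1
  rw [List.filter_map]
  simp only [Function.comp_def]
  have hnd := PySem.Set.nodup_ofList w.toList
  by_cases hmem : ch ∈ w.toList
  · have hm : ch ∈ PySem.Set.ofList w.toList := (PySem.Set.mem_ofList _ _).mpr hmem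
    have : (PySem.Set.ofList w.toList).filter (fun c => (c, idx).1 == ch) = [ch] := by
      simp only []
      rw [List.filter_beq, List.count_eq_one_of_mem hnd hm]
      rfl
    simp [this, hmem]
  · have : (PySem.Set.ofList w.toList).filter (fun c => (c, idx).1 == ch) = [] := by
      simp only [List.filter_eq_nil_iff]
      intro a ha
      simp only [beq_iff_eq]
      intro h; exact hmem ((PySem.Set.mem_ofList _ _).mp (h ▸ ha))
    simp [this, hmem]

theorem bIndex_getD_aux (ws : List String) (k : Int) (d : PySem.Dict Char (List Int)) (ch : Char) :
    ((bEnum k ws).foldl (fun d p => bAddWord d p.1 p.2) d).getD ch [] =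
      d.getD ch [] ++ ((bEnum k ws).filter (fun p => p.2.toList.contains ch)).map (fun p => p.1) := by
  induction ws generalizing k d with
  | nil => simp [bEnum]
  | cons w ws ih =>
    simp only [bEnum, List.foldl_cons, ih, bAddWord_getD, List.filter_cons]
    by_cases h : ch ∈ w.toList
    · simp [h]
    · simp [h]

theorem bIndex_getD (words : List String) (ch : Char) :
    (bIndex words).getD ch [] =
      ((bEnum 0 words).filter (fun p => p.2.toList.contains ch)).map (fun p => p.1) := by
  rw [bIndex, bIndex_getD_aux]
  simp [PySem.Dict.getD_empty]

theorem pyShareChar_iff (w1 w2 : String) :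
    pyShareChar w1 w2 = true ↔ ∃ ch ∈ w1.toList, ch ∈ w2.toList := by
  simp [pyShareChar]

theorem mem_foldl_update {g : Char → List Int} (l : List Char) (s : PySem.Set Int) (y : Int) :
    y ∈ l.foldl (fun s ch => PySem.Set.update s (g ch)) s ↔ y ∈ s ∨ ∃ ch ∈ l, y ∈ g ch := by
  induction l generalizing s with
  | nil => simp
  | cons c l ih => simp [ih, PySem.Set.mem_update]; tauto

theorem nodup_foldl_update {g : Char → List Int} (l : List Char) (s : PySem.Set Int)
    (hs : s.Nodup) : (l.foldl (fun s ch => PySem.Set.update s (g ch)) s).Nodup := by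
  induction l generalizing s with
  | nil => exact hs
  | cons c l ih => exact ih _ (PySem.Set.nodup_update _ _ hs)

theorem nodup_bCand (index : PySem.Dict Char (List Int)) (w : String) :
    (bCand index w).Nodup :=
  nodup_foldl_update _ _ (by simp [PySem.Set.empty])

theorem mem_bCand (words : List String) (w : String) (j : Int) :
    j ∈ bCand (bIndex words) w ↔
      ∃ w', (j, w') ∈ bEnum 0 words ∧ pyShareChar w w' = true := by
  rw [bCand, mem_foldl_update]
  simp only [PySem.Set.empty, List.not_mem_nil, false_or, bIndex_getD, List.mem_map,
    List.mem_filter, pyShareChar_iff, PySem.Set.mem_ofList]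
  constructor
  · rintro ⟨ch, hch, ⟨p, ⟨hp, hcp⟩, rfl⟩⟩
    exact ⟨p.2, by simpa using hp, ch, hch, by simpa using hcp⟩
  · rintro ⟨w', hw', ch, hch, hch'⟩
    exact ⟨ch, hch, ⟨(j, w'), ⟨hw', by simpa using hch'⟩, rfl⟩⟩

theorem pyRange_pairwise (a b : Int) : (PySem.List.pyRange a b).Pairwise (· < ·) := by
  rcases lt_or_ge a b with h | h
  · rw [PySem.List.pyRange_one_cons h]
    refine List.Pairwise.cons ?_ (pyRange_pairwise (a+1) b)
    intro x hx; have := PySem.List.mem_pyRange_one.mp hx; omega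
  · have he : PySem.List.pyRange a b = [] := by
      apply List.eq_nil_iff_forall_not_mem.mpr
      intro x hx; have := PySem.List.mem_pyRange_one.mp hx; omega
    simp [he]
termination_by (b - a).toNat

theorem members_eq (words : List String) (i : Int) (hi : 0 ≤ i) :
    PySem.List.sorted ((bCand (bIndex words) (aWordAt words i)).filter (fun j => decide (i < j)))
        (fun x => x) =
      (PySem.List.pyRange (i + 1) (words.length : Int)).filter
        (fun j => pyShareChar (aWordAt words i) (aWordAt words j)) := by
  apply PySem.List.sorted_eq_of_perm_of_pairwise_lt
  · apply (List.perm_ext_iff_of_nodup ?_ ?_).mpr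
    · intro x
      simp only [List.mem_filter, PySem.List.mem_pyRange_one, mem_bCand, mem_bEnum,
        decide_eq_true_eq]
      constructor
      · rintro ⟨⟨h1, h2⟩, h3⟩
        exact ⟨⟨aWordAt words x, ⟨by omega, by omega, by simp⟩, h3⟩, by omega⟩
      · rintro ⟨⟨w', ⟨hw1, hw2, hw3⟩, hsh⟩, hlt⟩
        refine ⟨⟨by omega, by omega⟩, ?_⟩
        have : aWordAt words x = w' := by simpa using hw3
        rwa [this]
    · exact (pyRange_pairwise _ _).filter _ |>.nodup
    · exact (nodup_bCand _ _).filter _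
  · exact (pyRange_pairwise _ _).filter _

theorem aInner_eq (words : List String) (wi : String) (tg : List String) (used : List Int)
    (j : Int) :
    aInner words wi tg used j =
      (tg ++ ((PySem.List.pyRange j (words.length : Int)).filter
          (fun j' => pyShareChar wi (aWordAt words j'))).map (aWordAt words),
       used ++ (PySem.List.pyRange j (words.length : Int)).filter
          (fun j' => pyShareChar wi (aWordAt words j'))) := by
  rw [aInner]
  by_cases h : j < pyListLen words
  · rw [dif_pos h]
    rw [pyListLen_eq] at h
    rw [PySem.List.pyRange_one_cons h, List.filter_cons]
    by_cases hs : pyShareChar wi (aWordAt words j) = true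
    · rw [if_pos hs, aInner_eq, if_pos hs]
      simp
    · rw [if_neg hs, aInner_eq, if_neg hs]
  · rw [dif_neg h]
    rw [pyListLen_eq] at h
    have he : PySem.List.pyRange j (words.length : Int) = [] := by
      apply List.eq_nil_iff_forall_not_mem.mpr
      intro x hx; have := PySem.List.mem_pyRange_one.mp hx; omega
    simp [he]
termination_by (pyListLen words - j).toNat
decreasing_by all_goals omega

theorem main_eq (words : List String) (ws : List String) (k : Int) (hk : 0 ≤ k)
    (hdrop : words.drop k.toNat = ws)
    (groups : List (List String)) (usedA : List Int) (usedB : PySem.Set Int)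
    (hinv : ∀ x, pyInList usedA x = true ↔ x ∈ usedB) :
    bGo words (bIndex words) (bEnum k ws) groups usedB = aMain words groups usedA k := by
  induction ws generalizing k groups usedA usedB with
  | nil =>
    rw [bEnum, bGo, aMain]
    have hn : ¬ k < pyListLen words := by
      rw [pyListLen_eq]
      have := congrArg List.length hdrop
      simp only [List.length_drop, List.length_nil] at this
      omega
    rw [dif_neg hn]
  | cons w ws ih =>
    have hlen := congrArg List.length hdrop
    simp only [List.length_drop, List.length_cons] at hlen
    have hklen : k.toNat < words.length := by omega
    have hw : aWordAt words k = w := by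
      rw [aWordAt, PySem.List.pyGetD_of_nonneg _ _ hk, List.getD_eq_getElem _ _ hklen]
      have : words[k.toNat] = (words.drop k.toNat)[0]'(by rw [hdrop]; simp) := by
        rw [List.getElem_drop]; simp
      rw [this]
      simp [hdrop]
    have hdrop' : words.drop (k + 1).toNat = ws := by
      have h1 : (k + 1).toNat = k.toNat + 1 := by omega
      rw [h1, ← List.drop_drop, hdrop, List.drop_one, List.tail_cons]
    have hlt : k < pyListLen words := by rw [pyListLen_eq]; omega
    rw [bEnum, bGo, aMain, dif_pos hlt]
    have hcont : PySem.Set.contains usedB k = pyInList usedA k := by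
      rcases Bool.eq_false_or_eq_true (pyInList usedA k) with h | h <;> rw [h]
      · rw [PySem.Set.contains_iff]
        exact (hinv k).mp h
      · rw [← Bool.not_eq_true]
        rw [PySem.Set.contains_iff]
        intro hm
        rw [← (hinv k)] at hm
        simp [hm] at h
    by_cases hu : pyInList usedA k = true
    · rw [if_pos hu, hcont, if_pos hu]
      exact ih (k + 1) (by omega) hdrop' groups usedA usedB hinv
    · rw [hcont, if_neg hu, if_neg hu]
      simp only []
      rw [hw.symm, members_eq words k hk, aInner_eq]
      set R := (PySem.List.pyRange (k + 1) (words.length : Int)).filter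
          (fun j' => pyShareChar (aWordAt words k) (aWordAt words j')) with hR
      refine ih (k + 1) (by omega) hdrop' _ _ _ ?_
      intro x
      constructor <;> intro hx
      · simp only [pyInList, List.any_append, Bool.or_eq_true] at hx
        rcases hx with (hx | hx) | hx
        · have := (hinv x).mp hx
          simp [PySem.Set.mem_update, PySem.Set.mem_add, this]
        · have hxk : x = k := by simp at hx; omega
          simp [PySem.Set.mem_update, PySem.Set.mem_add, hxk]
        · have hmem : x ∈ R := by
            simp only [List.any_eq_true, beq_iff_eq] at hx
            rcases hx with ⟨y, hy, hyx⟩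
            exact hyx ▸ hy
          simp [PySem.Set.mem_update, hmem]
      · simp only [PySem.Set.mem_update, PySem.Set.mem_add] at hx
        simp only [pyInList, List.any_append, Bool.or_eq_true]
        rcases hx with (hx | hx) | hx
        · exact Or.inl (Or.inl ((hinv x).mpr hx))
        · exact Or.inl (Or.inr (by simp [hx]))
        · exact Or.inr (List.any_eq_true.mpr ⟨x, hx, by simp⟩)

-- ===== VERDICT (by name: the statement is the Claim_ definition above) =====
theorem problem14_groupWords_spec : Claim_equal_problem14_groupWords := by
  intro words _
  unfold Spec_problem14_groupWords problem14_groupWords problem14_groupWords_alt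
  exact (main_eq words words 0 (le_refl 0) (by simp) [] [] [] (by simp [pyInList])).symm
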